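-- pv_equiv track=rewrite | github.com/chris97425/Tp2-NLP | ChristmasTree/chrisTrees.py | chrisTrees
-- ===== SOURCE A (Python) =====
-- def chrisTrees(hauteur):
--     '''
-- Hauteur:  pour la hauteur de l'arbre
-- bool: si true permet d'écrire l'arbre dans un fichier texte sinon un print de chrisTrees(10,false) affiche l'arbre en console
-- addSpace: permet à chaque étape de la boucle "for" d'enlever un espace
-- christmasTree: résultat final
--
-- Démarche: À chaque itération j'enlève un espace et j'ajoute 2 étoiles à l'arbre,
--            pour le tronc je précise qu'à chaque fois que je tombe sur un modulo 10 valant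
--             0 j'incrémente le tronc de 2 et aussi j'augmente ma variable decalForEnd qui me
--             permet de savoir combien d'espace j'ai à enlevé.
--
--             '''
--     addSpace = hauteur
--     baseTree = 1
--     decalForEnd = 0
--     christmasTree=""
--
--     for i in range(0,hauteur):
--
--         christmasTree += hilite(addSpace*" "+i*"*"+"*"+i*"*"+"\n",2)
--         addSpace-=1
--         if(i!=0 and i%10==0):
--
--             baseTree+=2
--             decalForEnd+=1
--
--     christmasTree+=hilite((hauteur-decalForEnd)*" "+baseTree*"*",1)
--
--     return christmasTree
--
-- def hilite(string, status):
--     attr = []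
--     if (status==1):
--         # green
--         attr.append('33')
--     else:
--         # red
--         attr.append('32')
--
--
--     return '\x1b[%sm%s\x1b[0m' % (';'.join(attr), string)
-- ===== SOURCE B (Python) =====
-- def hilite(string, status):
--     attr = []
--     if (status==1):
--         attr.append('33')
--     else:
--         attr.append('32')
--     return '\x1b[%sm%s\x1b[0m' % (';'.join(attr), string)
--
-- def chrisTrees(hauteur):
--     # Build the tree BOTTOM-UP: trunk first (computed in closed form), then the
--     # triangle rows from the lowest row upward, each derived from the row below
--     # it by string surgery (drop its last two stars, add one leading space);
--     # the collected pieces are joined in reverse at the end.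
--     count = max(0, (hauteur - 1) // 10)
--     parts = [hilite((hauteur - count) * " " + (1 + 2 * count) * "*", 1)]
--     row = " " + (2 * hauteur - 1) * "*"
--     for _ in range(hauteur):
--         parts.append(hilite(row + "\n", 2))
--         row = " " + row[:-2]
--     return "".join(reversed(parts))
-- ===== Notes on version B (the rewrite author's own statement) =====
-- stated objective: alternative
-- what changed: B builds the tree bottom-up: it computes the trunk first in closed form (max(0,(hauteur-1)//10)), starts from the bottom triangle row " "+(2h-1)*"*", and derives each upper row from the row below it by string surgery (row = " " + row[:-2]), collecting the pieces trunk-first and joining them reversed — instead of A's top-down loop that recomputes each row from the index and accumulates trunk counters with an in-loop modulo test.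
import Mathlib
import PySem

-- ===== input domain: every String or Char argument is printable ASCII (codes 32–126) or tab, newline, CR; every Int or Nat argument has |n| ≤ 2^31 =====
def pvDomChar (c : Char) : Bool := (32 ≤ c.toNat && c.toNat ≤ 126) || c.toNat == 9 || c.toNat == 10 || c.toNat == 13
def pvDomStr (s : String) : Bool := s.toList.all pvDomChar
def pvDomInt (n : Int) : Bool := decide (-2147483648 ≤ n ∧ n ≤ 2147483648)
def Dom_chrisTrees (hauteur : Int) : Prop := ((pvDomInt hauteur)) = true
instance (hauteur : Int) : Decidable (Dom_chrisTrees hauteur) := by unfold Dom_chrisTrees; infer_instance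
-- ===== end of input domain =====

-- B builds the tree bottom-up (trunk first, rows prepended, each upper row derived from the one
-- below by string surgery " "+row[:-2]) instead of A's top-down index loop with trunk counters.
-- Strings are modelled as List Char internally (String.ofList at the boundary); '%s' formatting is
-- ported as the corresponding concatenation (exact for this format string).

-- ===== PORT A =====
-- module helper 'hilite', shared verbatim by A and by Source B
def hiliteC (s : List Char) (status : Int) : List Char :=
  let attr : List (List Char) := []
  let attr := if status = 1 then attr ++ ["33".toList] else attr ++ ["32".toList]
  "\x1b[".toList ++ PySem.Chars.join ";".toList attr ++ "m".toList ++ s ++ "\x1b[0m".toList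

def chrisStepA (st : Int × Int × Int × List Char) (i : Int) : Int × Int × Int × List Char :=
  let addSpace := st.1; let baseTree := st.2.1; let decalForEnd := st.2.2.1; let tree := st.2.2.2
  let tree := tree ++ hiliteC (PySem.List.pyRepeat [' '] addSpace ++ PySem.List.pyRepeat ['*'] i
      ++ ['*'] ++ PySem.List.pyRepeat ['*'] i ++ ['\n']) 2
  let addSpace := addSpace - 1
  if i ≠ 0 ∧ PySem.Int.mod i 10 = 0 then (addSpace, baseTree + 2, decalForEnd + 1, tree)
  else (addSpace, baseTree, decalForEnd, tree)

def chrisTrees (hauteur : Int) : String :=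
  let st := (PySem.List.pyRange 0 hauteur 1).foldl chrisStepA (hauteur, 1, 0, ([] : List Char))
  String.ofList (st.2.2.2 ++
    hiliteC (PySem.List.pyRepeat [' '] (hauteur - st.2.2.1) ++ PySem.List.pyRepeat ['*'] st.2.1) 1)

-- ===== PORT B =====
-- one iteration of Source B's loop: append the hilited current row, then derive the upper row
def chrisStepB (st : List (List Char) × List Char) (_i : Int) : List (List Char) × List Char :=
  (st.1 ++ [hiliteC (st.2 ++ ['\n']) 2],
   [' '] ++ PySem.List.slice st.2 none (some (-2)))

def chrisTrees_alt (hauteur : Int) : String :=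
  let count := max 0 (PySem.Int.floordiv (hauteur - 1) 10)
  let parts := [hiliteC (PySem.List.pyRepeat [' '] (hauteur - count)
      ++ PySem.List.pyRepeat ['*'] (1 + 2 * count)) 1]
  let row := [' '] ++ PySem.List.pyRepeat ['*'] (2 * hauteur - 1)
  let st := (PySem.List.pyRange 0 hauteur 1).foldl chrisStepB (parts, row)
  String.ofList st.1.reverse.flatten

-- ===== PRECONDITION & SPEC =====
def Spec_chrisTrees (hauteur : Int) (out : String) : Prop := out = chrisTrees_alt hauteur
instance (hauteur : Int) (out : String) : Decidable (Spec_chrisTrees hauteur out) := by unfold Spec_chrisTrees; infer_instance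

-- ===== CLAIM (what is proved, stated in full; the proofs are below) =====
def Claim_equal_chrisTrees : Prop := ∀ (hauteur : Int), Dom_chrisTrees hauteur → Spec_chrisTrees hauteur (chrisTrees hauteur)

-- ===== LEMMAS AND PROOFS =====

-- the uncoloured triangle row at index i, and the coloured row with its newline
def pureRow (h i : Int) : List Char :=
  PySem.List.pyRepeat [' '] (h - i) ++ PySem.List.pyRepeat ['*'] (2 * i + 1)

def rowB (h i : Int) : List Char := hiliteC (pureRow h i ++ ['\n']) 2

-- the trunk counter A accumulates: number of i in range(n) with i != 0 and i % 10 == 0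
def cntT : Nat → Int
  | 0 => 0
  | n + 1 => cntT n + (if (n : Int) ≠ 0 ∧ PySem.Int.mod (n : Int) 10 = 0 then 1 else 0)

lemma cntT_eq (n : Nat) : cntT n = max 0 (PySem.Int.floordiv ((n : Int) - 1) 10) := by
  induction n with
  | zero =>
    simp [cntT]
  | succ n ih =>
    have hcast : ((n + 1 : Nat) : Int) - 1 = (n : Int) := by push_cast; ring
    rw [cntT, ih, hcast,
      PySem.Int.floordiv_eq_ediv_of_pos (a := (n : Int) - 1) (by norm_num : (0:Int) < 10),
      PySem.Int.floordiv_eq_ediv_of_pos (a := (n : Int)) (by norm_num : (0:Int) < 10),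
      PySem.Int.mod_eq_emod_of_pos (a := (n : Int)) (by norm_num : (0:Int) < 10)]
    split_ifs with hc
    · obtain ⟨h0, hm⟩ := hc
      omega
    · push_cast at hc ⊢
      omega

-- A's row at index i (with addSpace = h - i) is the coloured row rowB h i, for 0 ≤ i
lemma row_eq (h i : Int) (hi : 0 ≤ i) :
    hiliteC (PySem.List.pyRepeat [' '] (h - i) ++ PySem.List.pyRepeat ['*'] i
      ++ ['*'] ++ PySem.List.pyRepeat ['*'] i ++ ['\n']) 2 = rowB h i := by
  have : PySem.List.pyRepeat ['*'] i ++ ['*'] ++ PySem.List.pyRepeat ['*'] i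
      = PySem.List.pyRepeat ['*'] (2 * i + 1) := by
    rw [PySem.List.pyRepeat_singleton, PySem.List.pyRepeat_singleton]
    have h2 : (2 * i + 1).toNat = i.toNat + 1 + i.toNat := by omega
    rw [h2, List.replicate_add, List.replicate_add, List.replicate_one]
  rw [rowB, pureRow]
  rw [← this]
  simp [List.append_assoc]

lemma loopA (h : Int) (n : Nat) :
    (PySem.List.pyRange 0 (n : Int) 1).foldl chrisStepA (h, 1, 0, ([] : List Char)) =
      (h - n, 1 + 2 * cntT n, cntT n,
        ((PySem.List.pyRange 0 (n : Int) 1).map (rowB h)).flatten) := by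
  induction n with
  | zero => simp [PySem.List.pyRange_one_eq_nil (by omega : (0:Int) ≤ 0), cntT]
  | succ n ih =>
    have hsplit : PySem.List.pyRange 0 ((n : Nat) + 1 : Int) 1
        = PySem.List.pyRange 0 (n : Int) 1 ++ [(n : Int)] := by
      have := PySem.List.pyRange_one_succ_right (a := 0) (b := (n : Int)) (by positivity)
      exact_mod_cast this
    push_cast
    rw [hsplit, List.foldl_append, List.map_append, ih]
    simp only [List.foldl_cons, List.foldl_nil, List.map_cons, List.map_nil,
      List.flatten_append, List.flatten_cons, List.flatten_nil, List.append_nil]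
    rw [chrisStepA]
    simp only []
    rw [row_eq h (n : Int) (by positivity)]
    split_ifs with hc
    · rw [cntT, if_pos hc]
      refine Prod.ext (by push_cast; ring) (Prod.ext (by push_cast; ring) (Prod.ext (by push_cast; ring) rfl))
    · rw [cntT, if_neg hc]
      refine Prod.ext (by push_cast; ring) (Prod.ext (by ring) (Prod.ext (by ring) rfl))

-- Source B's row surgery " " + row[:-2] turns the row at index i into the row at index i-1 (1 ≤ i ≤ h)
lemma surgery (h i : Int) (h1 : 1 ≤ i) (h2 : i ≤ h) :
    [' '] ++ PySem.List.slice (pureRow h i) none (some (-2)) = pureRow h (i - 1) := by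
  rw [pureRow, pureRow, PySem.List.pyRepeat_singleton, PySem.List.pyRepeat_singleton,
    PySem.List.pyRepeat_singleton, PySem.List.pyRepeat_singleton,
    PySem.List.slice_to_neg_ofNat _ 2 (by omega)]
  simp only [List.length_append, List.length_replicate, List.take_append, List.take_replicate]
  have e1 : min ((h - i).toNat + (2 * i + 1).toNat - 2) (h - i).toNat = (h - i).toNat := by omega
  have e2 : min ((h - i).toNat + (2 * i + 1).toNat - 2 - (h - i).toNat) (2 * i + 1).toNat
      = (2 * (i - 1) + 1).toNat := by omega
  have e3 : (h - (i - 1)).toNat = (h - i).toNat + 1 := by omega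
  rw [e1, e2, e3, List.replicate_succ]
  simp

-- invariant of Source B's loop: after j iterations the parts list holds the trunk followed by rows
-- h-1 .. h-j (bottom-up), and (while j < h) the current row is the one at index h-1-j
lemma loopB (h : Int) (trunk : List Char) (j : Nat) (_hh : 0 ≤ h) (hj : (j : Int) ≤ h) :
    ∃ r, (PySem.List.pyRange 0 (j : Int) 1).foldl chrisStepB ([trunk], pureRow h (h - 1)) =
      (trunk :: ((PySem.List.pyRange (h - j) h 1).map (rowB h)).reverse, r) ∧
      ((j : Int) < h → r = pureRow h (h - 1 - j)) := by
  induction j with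
  | zero =>
    refine ⟨pureRow h (h - 1), ?_, ?_⟩
    · simp [PySem.List.pyRange_one_eq_nil (by omega : (0:Int) ≤ 0)]
    · intro _; norm_num
  | succ j ih =>
    obtain ⟨r, hfold, hrow⟩ := ih (by push_cast at hj ⊢; omega)
    have hjh : (j : Int) < h := by push_cast at hj; omega
    have hr : r = pureRow h (h - 1 - j) := hrow hjh
    have hsplit : PySem.List.pyRange 0 ((j : Nat) + 1 : Int) 1
        = PySem.List.pyRange 0 (j : Int) 1 ++ [(j : Int)] := by
      have := PySem.List.pyRange_one_succ_right (a := 0) (b := (j : Int)) (by positivity)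
      exact_mod_cast this
    refine ⟨[' '] ++ PySem.List.slice r none (some (-2)), ?_, ?_⟩
    · push_cast
      rw [hsplit, List.foldl_append, hfold]
      simp only [List.foldl_cons, List.foldl_nil]
      rw [chrisStepB]
      have hcons : PySem.List.pyRange (h - ((j : Int) + 1)) h 1
          = (h - ((j : Int) + 1)) :: PySem.List.pyRange (h - (j : Int)) h 1 := by
        rw [PySem.List.pyRange_one_cons (by omega)]
        have harg : h - ((j : Int) + 1) + 1 = h - (j : Int) := by ring
        rw [harg]
      rw [hcons]
      simp only [List.map_cons, List.reverse_cons]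
      rw [hr]
      have : h - 1 - (j : Int) = h - ((j : Int) + 1) := by ring
      rw [this, rowB]
      simp
    · intro hlt
      push_cast at hlt
      rw [hr]
      have := surgery h (h - 1 - j) (by omega) (by omega)
      rw [this]
      norm_num
      ring_nf

-- ===== VERDICT (by name: the statement is the Claim_ definition above) =====
theorem chrisTrees_spec : Claim_equal_chrisTrees := by
  intro h _
  unfold Spec_chrisTrees chrisTrees chrisTrees_alt
  by_cases hpos : 0 ≤ h
  · obtain ⟨n, hn⟩ : ∃ n : Nat, h = (n : Int) := ⟨h.toNat, by omega⟩
    subst hn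
    rw [loopA, cntT_eq]
    obtain ⟨r, hfold, -⟩ := loopB (n : Int)
      (hiliteC (PySem.List.pyRepeat [' '] ((n : Int) - max 0 (PySem.Int.floordiv ((n : Int) - 1) 10))
        ++ PySem.List.pyRepeat ['*'] (1 + 2 * max 0 (PySem.Int.floordiv ((n : Int) - 1) 10))) 1)
      n (by positivity) (le_refl _)
    have hrow0 : pureRow (n : Int) ((n : Int) - 1)
        = [' '] ++ PySem.List.pyRepeat ['*'] (2 * (n : Int) - 1) := by
      rw [pureRow]
      have e1 : (n : Int) - ((n : Int) - 1) = 1 := by ring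
      have e2 : (2 * ((n : Int) - 1) + 1) = 2 * (n : Int) - 1 := by ring
      rw [e1, e2, PySem.List.pyRepeat_singleton]
      norm_num
    rw [← hrow0]
    have hz : (n : Int) - (n : Int) = 0 := by ring
    rw [hz] at hfold
    simp at hfold
    simp [hfold]
  · have hnil : PySem.List.pyRange 0 h 1 = [] :=
      PySem.List.pyRange_one_eq_nil (by omega)
    have hcnt : max 0 (PySem.Int.floordiv (h - 1) 10) = 0 := by
      rw [PySem.Int.floordiv_eq_ediv_of_pos (by norm_num : (0:Int) < 10)]
      omega
    rw [hnil, hcnt]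
    simp
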